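-- pv_equiv track=rewrite | github.com/H1d3l/AquaBit | aquabit/usuarios/models.py | ocultaemail
-- ===== SOURCE A (Python) =====
-- def ocultaemail(email):
--     count = 0
--     fist_part = []
--     second_part = []
--     third_part = []
--     for i in email:
--         if i != "@":
--             if count<=3:
--                 fist_part.append(i)
--                 count+=1
--             else:
--                 second_part.append(i)
--         else:
--             break
--     fist_part = ''.join(fist_part)
--     second_part = ''.join(second_part)
--
--     oculto = []
--     for k in second_part:
--         oculto.append("*")
--     count2 = 0
--     for j in email:
--         count2 += 1
--         if count2>len(fist_part+second_part):
--             third_part.append(j)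
--
--     second_part = "".join(oculto)
--     third_part = "".join(third_part)
--     email_oculto = fist_part + second_part + third_part
--
--     return email_oculto
-- ===== SOURCE B (Python) =====
-- def ocultaemail(email):
--     at = email.find('@')
--     if at == -1:
--         at = len(email)
--     local = email[:at]
--     return local[:4] + '*' * (len(local) - 4) + email[at:]
-- ===== Notes on version B (the rewrite author's own statement) =====
-- stated objective: simpler
-- what changed: Replaces A's three character-accumulating loops and joins with one find('@') plus index-based slicing and a star repetition.
import Mathlib
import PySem

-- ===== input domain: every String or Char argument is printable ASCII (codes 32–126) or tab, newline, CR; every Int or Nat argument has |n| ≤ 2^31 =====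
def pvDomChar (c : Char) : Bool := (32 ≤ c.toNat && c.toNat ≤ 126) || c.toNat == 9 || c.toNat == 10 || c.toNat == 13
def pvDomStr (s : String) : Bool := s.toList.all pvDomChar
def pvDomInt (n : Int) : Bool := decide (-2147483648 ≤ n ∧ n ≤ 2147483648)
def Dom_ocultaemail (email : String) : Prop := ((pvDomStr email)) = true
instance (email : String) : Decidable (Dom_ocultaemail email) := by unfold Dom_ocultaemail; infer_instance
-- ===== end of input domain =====

-- B replaces A's three character-accumulating loops and joins with find('@') + slicing; objective: simpler.

-- ===== PORT A =====
-- first loop of A: break at '@', first 4 non-'@' chars into f (count tracks f), rest into s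
def pvLoopA : List Char → Nat → List Char → List Char → List Char × List Char
  | [], _, f, s => (f, s)
  | c :: t, count, f, s =>
    if c ≠ '@' then
      if count ≤ 3 then pvLoopA t (count + 1) (f ++ [c]) s
      else pvLoopA t count f (s ++ [c])
    else (f, s)

-- third loop of A: count2 over all chars, keep those with count2 > n
def pvLoopC : List Char → Nat → Nat → List Char → List Char
  | [], _, _, acc => acc
  | c :: t, count2, n, acc =>
    if count2 + 1 > n then pvLoopC t (count2 + 1) n (acc ++ [c])
    else pvLoopC t (count2 + 1) n (acc)

def ocultaemail (email : String) : String :=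
  let l := email.toList
  let fs := pvLoopA l 0 [] []
  let oculto := fs.2.map (fun _ => '*')
  let third := pvLoopC l 0 (fs.1 ++ fs.2).length []
  String.ofList (fs.1 ++ oculto ++ third)

-- ===== PORT B =====
-- '*' * (len(local) - 4) with a possibly negative count yields '' in Python; Nat subtraction in replicate is exact for that
def ocultaemail_alt (email : String) : String :=
  let l := email.toList
  let at0 : Int := PySem.Chars.find l ['@']
  let at1 : Int := if at0 = -1 then (l.length : Int) else at0
  let loc := PySem.List.slice l none (some at1)
  String.ofList (PySem.List.slice loc none (some (4 : Int)) ++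
                 List.replicate (loc.length - 4) '*' ++
                 PySem.List.slice l (some at1) none)

-- ===== PRECONDITION & SPEC =====
def Spec_ocultaemail (email : String) (out : String) : Prop := out = ocultaemail_alt email
instance (email : String) (out : String) : Decidable (Spec_ocultaemail email out) := by unfold Spec_ocultaemail; infer_instance

-- ===== CLAIM (what is proved, stated in full; the proofs are below) =====
def Claim_equal_ocultaemail : Prop := ∀ (email : String), Dom_ocultaemail email → Spec_ocultaemail email (ocultaemail email)

-- ===== LEMMAS AND PROOFS =====

theorem pvLoopA_spec (l : List Char) (count : Nat) (f s : List Char) :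
    pvLoopA l count f s =
      (f ++ (l.takeWhile (· ≠ '@')).take (4 - count),
       s ++ (l.takeWhile (· ≠ '@')).drop (4 - count)) := by
  induction l generalizing count f s with
  | nil => simp [pvLoopA]
  | cons c t ih =>
    by_cases hc : c = '@'
    · simp [pvLoopA, hc, List.takeWhile]
    · by_cases hcount : count ≤ 3
      · have h4 : 4 - count = (4 - (count + 1)) + 1 := by omega
        simp [pvLoopA, hc, hcount, ih, List.takeWhile, h4]
      · have h0 : 4 - count = 0 := by omega
        simp [pvLoopA, hc, hcount, ih, List.takeWhile, h0]

theorem pvLoopC_spec (l : List Char) (count2 n : Nat) (acc : List Char) :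
    pvLoopC l count2 n acc = acc ++ l.drop (n - count2) := by
  induction l generalizing count2 acc with
  | nil => simp [pvLoopC]
  | cons c t ih =>
    by_cases h : count2 + 1 > n
    · have h0 : n - count2 = 0 := by omega
      have h0' : n - (count2 + 1) = 0 := by omega
      simp [pvLoopC, h, ih, h0, h0']
    · have h1 : n - count2 = (n - (count2 + 1)) + 1 := by omega
      simp [pvLoopC, h, ih, h1]

-- A's result in closed form, with tw = the part before the first '@'
theorem ocultaemail_closed (email : String) :
    ocultaemail email =
      String.ofList ((email.toList.takeWhile (· ≠ '@')).take 4 ++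
        List.replicate ((email.toList.takeWhile (· ≠ '@')).length - 4) '*' ++
        email.toList.drop (email.toList.takeWhile (· ≠ '@')).length) := by
  simp only [ocultaemail, pvLoopA_spec, pvLoopC_spec, List.nil_append, Nat.sub_zero]
  have hmap : ((email.toList.takeWhile (· ≠ '@')).drop 4).map (fun _ => '*') =
      List.replicate ((email.toList.takeWhile (· ≠ '@')).length - 4) '*' := by
    rw [List.eq_replicate_iff]
    simp
  rw [hmap]
  congr 2
  simp

theorem takeWhile_len_of_first (l : List Char) (j : Nat)
    (hj : ['@'] <+: l.drop j) (hmin : ∀ i, i < j → ¬ ['@'] <+: l.drop i) :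
    (l.takeWhile (· ≠ '@')).length = j := by
  induction l generalizing j with
  | nil => simp at hj
  | cons c t ih =>
    cases j with
    | zero =>
      simp only [List.drop_zero] at hj
      obtain ⟨u, hu⟩ := hj
      simp only [List.cons_append, List.nil_append, List.cons.injEq] at hu
      simp [List.takeWhile, hu.1.symm]
    | succ j =>
      have hc : c ≠ '@' := by
        intro h
        exact hmin 0 (by omega) (by subst h; exact ⟨t, rfl⟩)
      have : (t.takeWhile (· ≠ '@')).length = j := by
        apply ih j (by simpa using hj)
        intro i hi hpre
        exact hmin (i + 1) (by omega) (by simpa using hpre)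
      simp only [List.takeWhile, hc, decide_not] at this ⊢
      simp [this]

theorem takeWhile_eq_self_of_not_mem (l : List Char) (h : '@' ∉ l) :
    l.takeWhile (· ≠ '@') = l := by
  rw [List.takeWhile_eq_self_iff]
  intro x hx
  simp only [ne_eq, decide_eq_true_eq]
  rintro rfl
  exact h hx

theorem find_if_natCast (l : List Char) :
    ∃ n : Nat, ((if PySem.Chars.find l ['@'] = -1 then (l.length : Int)
      else PySem.Chars.find l ['@']) = (n : Int)) ∧ n = (l.takeWhile (· ≠ '@')).length := by
  by_cases hf : PySem.Chars.find l ['@'] = -1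
  · refine ⟨l.length, by simp [hf], ?_⟩
    have hnm : '@' ∉ l := by
      intro hmem
      have : (['@'] : List Char) <:+: l := by
        obtain ⟨u, v, huv⟩ := List.append_of_mem hmem
        exact ⟨u, v, by simp [huv]⟩
      exact (PySem.Chars.find_eq_neg_one_iff l ['@']).mp hf this
    rw [takeWhile_eq_self_of_not_mem l hnm]
  · have hk : (0 : Nat) ≤ l.length := Nat.zero_le _
    have h0 : PySem.Chars.findFrom l ['@'] ((0 : Nat) : Int) none = PySem.Chars.find l ['@'] := by
      simpa using PySem.Chars.findFrom_zero l ['@']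
    have hspec := PySem.Chars.findFrom_natCast_spec l ['@'] 0 hk (by simp [h0, hf])
    rw [h0] at hspec
    obtain ⟨hge, hpre, hminp⟩ := hspec
    have hnn : 0 ≤ PySem.Chars.find l ['@'] := by exact_mod_cast hge
    refine ⟨(PySem.Chars.find l ['@']).toNat, by simp [hf, Int.toNat_of_nonneg hnn], ?_⟩
    exact (takeWhile_len_of_first l _ hpre (fun i hi => hminp i (Nat.zero_le i) hi)).symm

-- ===== VERDICT (by name: the statement is the Claim_ definition above) =====
theorem ocultaemail_spec : Claim_equal_ocultaemail := by
  intro email _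
  unfold Spec_ocultaemail ocultaemail_alt
  rw [ocultaemail_closed]
  obtain ⟨n, hn, hntw⟩ := find_if_natCast email.toList
  simp only [hn]
  have hnn4 : (0 : Int) ≤ (n : Int) := by positivity
  rw [PySem.List.slice_to _ hnn4, PySem.List.slice_from _ hnn4, Int.toNat_natCast]
  have hloc : email.toList.take n = email.toList.takeWhile (· ≠ '@') := by
    rw [hntw]
    exact (List.prefix_iff_eq_take.mp (List.takeWhile_prefix _)).symm
  rw [hloc, PySem.List.slice_to _ (by norm_num : (0:Int) ≤ 4), hntw]
  norm_num
  rfl
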